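-- pv_equiv track=rewrite | github.com/MrBrantCode/unitest_baseline | mut_generate/mist_train_cf/cf_8423/solution.py | find_highest_peak
-- ===== SOURCE A (Python) =====
-- def find_highest_peak(arr):
--     n = len(arr)
--
--     # Create two arrays to store the indices of the valleys and peaks
--     valleys = []
--     peaks = []
--
--     # Iterate through the array to find the valleys and peaks
--     for i in range(1, n-1):
--         if arr[i] < arr[i-1] and arr[i] < arr[i+1]:
--             valleys.append(i)
--         elif arr[i] > arr[i-1] and arr[i] > arr[i+1]:
--             peaks.append(i)
--
--     # Iterate through the peaks to find the highest peak surrounded by two valleys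
--     highest_peak = -1
--     highest_peak_value = float('-inf')
--     for peak in peaks:
--         left_valley = -1
--         right_valley = n
--         for valley in valleys:
--             if valley < peak:
--                 left_valley = valley
--             else:
--                 right_valley = valley
--                 break
--         if left_valley != -1 and right_valley != n and arr[peak] > highest_peak_value:
--             highest_peak = peak
--             highest_peak_value = arr[peak]
--
--     return highest_peak
-- ===== SOURCE B (Python) =====
-- def find_highest_peak(arr):
--     n = len(arr)
--     # one linear pass for the first and last valley index
--     fv = lv = -1
--     for i in range(1, n - 1):
--         if arr[i] < arr[i-1] and arr[i] < arr[i+1]: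
--             if fv == -1:
--                 fv = i
--             lv = i
--     # one linear pass: a peak qualifies iff it lies strictly between them
--     best = -1
--     for i in range(1, n - 1):
--         if fv < i < lv and arr[i] > arr[i-1] and arr[i] > arr[i+1]:
--             if best == -1 or arr[i] > arr[best]:
--                 best = i
--     return best
-- ===== Notes on version B (the rewrite author's own statement) =====
-- stated objective: faster
-- what changed: A rescans the whole valley list for every peak (quadratic); B makes two linear passes: one recording the first and last valley index, one picking the highest earliest peak lying strictly between them, which is equivalent because the valley indices are increasing.
import Mathlib
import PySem

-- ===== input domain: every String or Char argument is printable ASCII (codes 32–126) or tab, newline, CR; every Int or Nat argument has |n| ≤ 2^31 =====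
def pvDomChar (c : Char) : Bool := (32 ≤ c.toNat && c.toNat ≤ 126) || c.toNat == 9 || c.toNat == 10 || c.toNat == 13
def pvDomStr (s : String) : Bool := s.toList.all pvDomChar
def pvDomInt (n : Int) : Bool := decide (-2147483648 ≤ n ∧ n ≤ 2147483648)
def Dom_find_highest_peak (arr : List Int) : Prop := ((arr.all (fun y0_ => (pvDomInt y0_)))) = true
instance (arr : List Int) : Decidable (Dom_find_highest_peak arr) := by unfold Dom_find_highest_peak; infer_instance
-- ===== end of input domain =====

-- B replaces A's per-peak rescan of the valley list by two linear passes (first/last valley,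
-- then best peak strictly between them): asymptotically faster, same return value.

-- ===== PORT A =====
-- indices i-1, i, i+1 and peak drawn from range(1, n-1) are always in range, so pyGetD with
-- a dummy default is exact for arr[i-1], arr[i], arr[i+1], arr[peak] here.
def pvVPLoopA (arr : List Int) : List Int → List Int × List Int → List Int × List Int
  | [], vp => vp
  | i :: rest, (vs, ps) =>
    if PySem.List.pyGetD arr i 0 < PySem.List.pyGetD arr (i-1) 0 ∧
       PySem.List.pyGetD arr i 0 < PySem.List.pyGetD arr (i+1) 0 then
      pvVPLoopA arr rest (vs ++ [i], ps)
    else if PySem.List.pyGetD arr i 0 > PySem.List.pyGetD arr (i-1) 0 ∧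
            PySem.List.pyGetD arr i 0 > PySem.List.pyGetD arr (i+1) 0 then
      pvVPLoopA arr rest (vs, ps ++ [i])
    else pvVPLoopA arr rest (vs, ps)

-- the inner 'for valley in valleys: …; else: right_valley = valley; break'
def pvScanA : List Int → Int → Int → Int → Int × Int
  | [], _, left, right => (left, right)
  | v :: rest, peak, left, right =>
    if v < peak then pvScanA rest peak v right else (left, v)

def pvPeakLoopA (arr : List Int) (valleys : List Int) (n : Int) : List Int → Int → Option Int → Int
  | [], hp, _ => hp
  | p :: rest, hp, hpv =>
    let lr := pvScanA valleys p (-1) n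
    if lr.1 ≠ -1 ∧ lr.2 ≠ n ∧ hpv.all (fun v => decide (v < PySem.List.pyGetD arr p 0)) = true then
      pvPeakLoopA arr valleys n rest p (some (PySem.List.pyGetD arr p 0))
    else pvPeakLoopA arr valleys n rest hp hpv

def find_highest_peak (arr : List Int) : Int :=
  let n : Int := arr.length
  let vp := pvVPLoopA arr (PySem.List.pyRange 1 (n-1) 1) ([], [])
  pvPeakLoopA arr vp.1 n vp.2 (-1) none

-- ===== PORT B =====
def pvVLoopB (arr : List Int) : List Int → Int × Int → Int × Int
  | [], fl => fl
  | i :: rest, (fv, lv) =>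
    if PySem.List.pyGetD arr i 0 < PySem.List.pyGetD arr (i-1) 0 ∧
       PySem.List.pyGetD arr i 0 < PySem.List.pyGetD arr (i+1) 0 then
      pvVLoopB arr rest (if fv = -1 then i else fv, i)
    else pvVLoopB arr rest (fv, lv)

def pvPLoopB (arr : List Int) (fv lv : Int) : List Int → Int → Int
  | [], best => best
  | i :: rest, best =>
    if fv < i ∧ i < lv ∧ PySem.List.pyGetD arr i 0 > PySem.List.pyGetD arr (i-1) 0 ∧
       PySem.List.pyGetD arr i 0 > PySem.List.pyGetD arr (i+1) 0 then
      if best = -1 ∨ PySem.List.pyGetD arr i 0 > PySem.List.pyGetD arr best 0 then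
        pvPLoopB arr fv lv rest i
      else pvPLoopB arr fv lv rest best
    else pvPLoopB arr fv lv rest best

def find_highest_peak_alt (arr : List Int) : Int :=
  let n : Int := arr.length
  let fl := pvVLoopB arr (PySem.List.pyRange 1 (n-1) 1) (-1, -1)
  pvPLoopB arr fl.1 fl.2 (PySem.List.pyRange 1 (n-1) 1) (-1)

-- ===== PRECONDITION & SPEC =====
def Spec_find_highest_peak (arr : List Int) (out : Int) : Prop := out = find_highest_peak_alt arr
instance (arr : List Int) (out : Int) : Decidable (Spec_find_highest_peak arr out) := by unfold Spec_find_highest_peak; infer_instance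

-- ===== CLAIM (what is proved, stated in full; the proofs are below) =====
def Claim_equal_find_highest_peak : Prop := ∀ (arr : List Int), Dom_find_highest_peak arr → Spec_find_highest_peak arr (find_highest_peak arr)

-- ===== LEMMAS AND PROOFS =====

def pvIsValB (arr : List Int) (i : Int) : Bool :=
  decide (PySem.List.pyGetD arr i 0 < PySem.List.pyGetD arr (i-1) 0) &&
  decide (PySem.List.pyGetD arr i 0 < PySem.List.pyGetD arr (i+1) 0)

def pvIsPkB (arr : List Int) (i : Int) : Bool :=
  decide (PySem.List.pyGetD arr i 0 > PySem.List.pyGetD arr (i-1) 0) &&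
  decide (PySem.List.pyGetD arr i 0 > PySem.List.pyGetD arr (i+1) 0)

def pvVStep : Int × Int → Int → Int × Int := fun fl v => (if fl.1 = -1 then v else fl.1, v)

lemma pvVPLoopA_eq (arr : List Int) : ∀ (L : List Int) (vs ps : List Int),
    pvVPLoopA arr L (vs, ps) = (vs ++ L.filter (pvIsValB arr), ps ++ L.filter (pvIsPkB arr)) := by
  intro L
  induction L with
  | nil => intro vs ps; simp [pvVPLoopA]
  | cons i rest ih =>
    intro vs ps
    simp only [pvVPLoopA]
    split_ifs with h1 h2
    · have hv : pvIsValB arr i = true := by simp [pvIsValB]; omega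
      have hpk : pvIsPkB arr i = false := by simp [pvIsPkB]; omega
      rw [ih, List.filter_cons, List.filter_cons, hv, hpk]; simp
    · have hv : pvIsValB arr i = false := by simp [pvIsValB]; omega
      have hpk : pvIsPkB arr i = true := by simp [pvIsPkB]; omega
      rw [ih, List.filter_cons, List.filter_cons, hv, hpk]; simp
    · have hv : pvIsValB arr i = false := by simp [pvIsValB]; omega
      have hpk : pvIsPkB arr i = false := by simp [pvIsPkB]; omega
      rw [ih, List.filter_cons, List.filter_cons, hv, hpk]; simp

lemma pvVLoopB_eq (arr : List Int) : ∀ (L : List Int) (st : Int × Int),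
    pvVLoopB arr L st = (L.filter (pvIsValB arr)).foldl pvVStep st := by
  intro L
  induction L with
  | nil => intro st; simp [pvVLoopB]
  | cons i rest ih =>
    rintro ⟨fv, lv⟩
    simp only [pvVLoopB]
    by_cases h1 : PySem.List.pyGetD arr i 0 < PySem.List.pyGetD arr (i-1) 0 ∧
        PySem.List.pyGetD arr i 0 < PySem.List.pyGetD arr (i+1) 0
    · have hv : pvIsValB arr i = true := by
        simp only [pvIsValB, Bool.and_eq_true, decide_eq_true_eq]; exact h1
      rw [if_pos h1, ih, List.filter_cons, hv]
      simp [pvVStep]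
    · have hv : pvIsValB arr i = false := by simp [pvIsValB]; omega
      rw [if_neg h1, ih, List.filter_cons, hv]
      simp

lemma pvVFold_ne : ∀ (V : List Int) (f l : Int), f ≠ -1 →
    V.foldl pvVStep (f, l) = (f, V.getLastD l) := by
  intro V
  induction V with
  | nil => intro f l hf; simp
  | cons v vs ih =>
    intro f l hf
    simp only [List.foldl_cons, pvVStep, if_neg hf]
    rw [ih _ _ hf, List.getLastD_cons]

lemma pvVFold_start (V : List Int) (hpos : ∀ v ∈ V, 0 < v) :
    V.foldl pvVStep (-1, -1) = (V.headD (-1), V.getLastD (-1)) := by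
  cases V with
  | nil => simp
  | cons v vs =>
    have hv : (0:Int) < v := hpos v (by simp)
    have hstep : pvVStep (-1, -1) v = (v, v) := by simp [pvVStep]
    rw [List.foldl_cons, hstep, pvVFold_ne vs v v (by omega), List.getLastD_cons, List.headD_cons]

lemma pvScanA_pos (p n : Int) : ∀ (vs : List Int) (l : Int), 0 < l → (∀ v ∈ vs, 0 < v) →
    0 < (pvScanA vs p l n).1 := by
  intro vs
  induction vs with
  | nil => intro l hl _; simpa [pvScanA] using hl
  | cons v rest ih =>
    intro l hl hall
    simp only [pvScanA]
    split_ifs with h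
    · exact ih v (hall v (by simp)) (fun x hx => hall x (by simp [hx]))
    · simpa using hl

lemma pvScanA_fst (p n : Int) : ∀ (vs : List Int), vs.Pairwise (· < ·) → (∀ v ∈ vs, 0 < v) →
    ((pvScanA vs p (-1) n).1 ≠ -1 ↔ ∃ v ∈ vs, v < p) := by
  intro vs
  induction vs with
  | nil => intro _ _; simp [pvScanA]
  | cons v rest ih =>
    intro hs hpos
    simp only [pvScanA]
    split_ifs with h
    · constructor
      · intro _; exact ⟨v, by simp, h⟩
      · intro _
        have := pvScanA_pos p n rest v (hpos v (by simp)) (fun x hx => hpos x (by simp [hx]))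
        omega
    · constructor
      · intro hc; exact absurd rfl hc
      · rintro ⟨w, hw, hwp⟩
        rcases List.mem_cons.mp hw with rfl | hw2
        · omega
        · have := (List.pairwise_cons.mp hs).1 w hw2; omega

lemma pvScanA_snd (p n : Int) : ∀ (vs : List Int) (l : Int), (∀ v ∈ vs, v < n) →
    ((pvScanA vs p l n).2 ≠ n ↔ ∃ v ∈ vs, p ≤ v) := by
  intro vs
  induction vs with
  | nil => intro l _; simp [pvScanA]
  | cons v rest ih =>
    intro l hall
    simp only [pvScanA]
    split_ifs with h
    · rw [ih v (fun x hx => hall x (by simp [hx]))]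
      constructor
      · rintro ⟨w, hw, hwp⟩; exact ⟨w, by simp [hw], hwp⟩
      · rintro ⟨w, hw, hwp⟩
        rcases List.mem_cons.mp hw with rfl | hw2
        · omega
        · exact ⟨w, hw2, hwp⟩
    · have hvn := hall v (by simp)
      constructor
      · intro _; exact ⟨v, by simp, by omega⟩
      · intro _; simp; omega

lemma pvHeadD_le (V : List Int) (hs : V.Pairwise (· < ·)) (d : Int) :
    ∀ v ∈ V, V.headD d ≤ v := by
  cases V with
  | nil => intro v hv; simp at hv
  | cons a vs =>
    intro v hv
    rcases List.mem_cons.mp hv with rfl | h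
    · simp
    · have := (List.pairwise_cons.mp hs).1 v h
      simp only [List.headD_cons]; omega

lemma pvLe_getLastD (V : List Int) (hs : V.Pairwise (· < ·)) :
    ∀ (d : Int), ∀ v ∈ V, v ≤ V.getLastD d := by
  induction V with
  | nil => intro d v hv; simp at hv
  | cons a vs ih =>
    intro d v hv
    cases vs with
    | nil =>
      rcases List.mem_cons.mp hv with rfl | h
      · simp
      · simp at h
    | cons b vs2 =>
      rw [List.getLastD_cons]
      have hs2 := (List.pairwise_cons.mp hs).2
      rcases List.mem_cons.mp hv with rfl | h
      · have hb : v < b := (List.pairwise_cons.mp hs).1 b (by simp)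
        have := ih hs2 v b (by simp)
        omega
      · exact ih hs2 a v h

lemma pvGetLastD_mem : ∀ (vs : List Int) (a d : Int), (a :: vs).getLastD d ∈ a :: vs := by
  intro vs
  induction vs with
  | nil => intro a d; simp
  | cons b vs2 ih =>
    intro a d
    rw [List.getLastD_cons]
    exact List.mem_cons_of_mem a (ih b a)

lemma pvCond_iff (arr V : List Int) (n p : Int)
    (hs : V.Pairwise (· < ·)) (hb : ∀ v ∈ V, 0 < v ∧ v < n) (hvV : ∀ v ∈ V, pvIsValB arr v = true)
    (hp1 : 0 < p) (hpk : pvIsPkB arr p = true) :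
    ((pvScanA V p (-1) n).1 ≠ -1 ∧ (pvScanA V p (-1) n).2 ≠ n) ↔
      (V.headD (-1) < p ∧ p < V.getLastD (-1)) := by
  have hpos : ∀ v ∈ V, 0 < v := fun v hv => (hb v hv).1
  have hlt : ∀ v ∈ V, v < n := fun v hv => (hb v hv).2
  rw [pvScanA_fst p n V hs hpos, pvScanA_snd p n V (-1) hlt]
  have hne : ∀ v ∈ V, v ≠ p := by
    intro v hv hvp
    have h1 := hvV v hv
    rw [hvp] at h1
    simp [pvIsValB] at h1
    simp [pvIsPkB] at hpk
    omega
  cases V with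
  | nil =>
    simp only [List.headD_nil, List.getLastD_nil]
    constructor
    · rintro ⟨⟨w, hw, _⟩, _⟩; simp at hw
    · intro h; omega
  | cons a vs =>
    constructor
    · rintro ⟨⟨w, hw, hwp⟩, ⟨u, hu, hup⟩⟩
      have h1 := pvHeadD_le (a :: vs) hs (-1) w hw
      have h2 := pvLe_getLastD (a :: vs) hs (-1) u hu
      have h3 := hne u hu
      exact ⟨by omega, by omega⟩
    · rintro ⟨h1, h2⟩
      refine ⟨⟨(a :: vs).headD (-1), by simp, h1⟩, ⟨(a :: vs).getLastD (-1), pvGetLastD_mem vs a (-1), by omega⟩⟩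

lemma pvLoops_eq (arr V : List Int) (n fv lv : Int) : ∀ (L : List Int) (best : Int),
    (∀ i ∈ L, 0 < i) →
    (∀ p ∈ L, pvIsPkB arr p = true →
      (((pvScanA V p (-1) n).1 ≠ -1 ∧ (pvScanA V p (-1) n).2 ≠ n) ↔ (fv < p ∧ p < lv))) →
    pvPeakLoopA arr V n (L.filter (pvIsPkB arr)) best
        (if best = -1 then none else some (PySem.List.pyGetD arr best 0))
      = pvPLoopB arr fv lv L best := by
  intro L
  induction L with
  | nil => intro best _ _; simp [pvPLoopB, pvPeakLoopA]
  | cons i rest ih =>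
    intro best hposL hiff
    have hposr : ∀ j ∈ rest, 0 < j := fun j hj => hposL j (by simp [hj])
    have hiffr : ∀ p ∈ rest, pvIsPkB arr p = true →
        (((pvScanA V p (-1) n).1 ≠ -1 ∧ (pvScanA V p (-1) n).2 ≠ n) ↔ (fv < p ∧ p < lv)) :=
      fun p hp hpk => hiff p (by simp [hp]) hpk
    have hi0 : (0:Int) < i := hposL i (by simp)
    have hi : i ≠ -1 := by omega
    have ihi := ih i hposr hiffr
    rw [if_neg hi] at ihi
    have ihb := ih best hposr hiffr
    by_cases hpk : pvIsPkB arr i = true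
    · have hpkprop : PySem.List.pyGetD arr i 0 > PySem.List.pyGetD arr (i-1) 0 ∧
          PySem.List.pyGetD arr i 0 > PySem.List.pyGetD arr (i+1) 0 := by
        simp only [pvIsPkB, Bool.and_eq_true, decide_eq_true_eq] at hpk
        exact hpk
      have hiffi := hiff i (by simp) hpk
      rw [List.filter_cons_of_pos hpk]
      simp only [pvPeakLoopA, pvPLoopB]
      by_cases hA : (pvScanA V i (-1) n).1 ≠ -1 ∧ (pvScanA V i (-1) n).2 ≠ n
      · have hB := hiffi.mp hA
        have hBc : fv < i ∧ i < lv ∧ PySem.List.pyGetD arr i 0 > PySem.List.pyGetD arr (i-1) 0 ∧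
            PySem.List.pyGetD arr i 0 > PySem.List.pyGetD arr (i+1) 0 :=
          ⟨hB.1, hB.2, hpkprop.1, hpkprop.2⟩
        rw [if_pos hBc]
        by_cases hbest : best = -1
        · rw [if_pos hbest, if_pos (Or.inl hbest)]
          have hAc : (pvScanA V i (-1) n).1 ≠ -1 ∧ (pvScanA V i (-1) n).2 ≠ n ∧
              Option.all (fun v => decide (v < PySem.List.pyGetD arr i 0)) none = true :=
            ⟨hA.1, hA.2, rfl⟩
          rw [if_pos hAc]
          exact ihi
        · rw [if_neg hbest]
          by_cases hlt : PySem.List.pyGetD arr i 0 > PySem.List.pyGetD arr best 0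
          · rw [if_pos (Or.inr hlt)]
            have hAc : (pvScanA V i (-1) n).1 ≠ -1 ∧ (pvScanA V i (-1) n).2 ≠ n ∧
                Option.all (fun v => decide (v < PySem.List.pyGetD arr i 0))
                  (some (PySem.List.pyGetD arr best 0)) = true :=
              ⟨hA.1, hA.2, by simpa using hlt⟩
            rw [if_pos hAc]
            exact ihi
          · have hnB : ¬(best = -1 ∨ PySem.List.pyGetD arr i 0 > PySem.List.pyGetD arr best 0) :=
              fun hc => hc.elim hbest hlt
            rw [if_neg hnB]
            have hnA : ¬((pvScanA V i (-1) n).1 ≠ -1 ∧ (pvScanA V i (-1) n).2 ≠ n ∧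
                Option.all (fun v => decide (v < PySem.List.pyGetD arr i 0))
                  (some (PySem.List.pyGetD arr best 0)) = true) := by
              intro hc
              exact hlt (by simpa using hc.2.2)
            rw [if_neg hnA]
            rw [if_neg hbest] at ihb
            exact ihb
      · have hnB : ¬(fv < i ∧ i < lv ∧ PySem.List.pyGetD arr i 0 > PySem.List.pyGetD arr (i-1) 0 ∧
            PySem.List.pyGetD arr i 0 > PySem.List.pyGetD arr (i+1) 0) :=
          fun hc => hA (hiffi.mpr ⟨hc.1, hc.2.1⟩)
        rw [if_neg hnB]
        by_cases hbest : best = -1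
        · rw [if_pos hbest]
          have hnA : ¬((pvScanA V i (-1) n).1 ≠ -1 ∧ (pvScanA V i (-1) n).2 ≠ n ∧
              Option.all (fun v => decide (v < PySem.List.pyGetD arr i 0)) none = true) :=
            fun hc => hA ⟨hc.1, hc.2.1⟩
          rw [if_neg hnA]
          rw [if_pos hbest] at ihb
          exact ihb
        · rw [if_neg hbest]
          have hnA : ¬((pvScanA V i (-1) n).1 ≠ -1 ∧ (pvScanA V i (-1) n).2 ≠ n ∧
              Option.all (fun v => decide (v < PySem.List.pyGetD arr i 0))
                (some (PySem.List.pyGetD arr best 0)) = true) :=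
            fun hc => hA ⟨hc.1, hc.2.1⟩
          rw [if_neg hnA]
          rw [if_neg hbest] at ihb
          exact ihb
    · rw [List.filter_cons_of_neg hpk]
      simp only [pvPLoopB]
      have hnB : ¬(fv < i ∧ i < lv ∧ PySem.List.pyGetD arr i 0 > PySem.List.pyGetD arr (i-1) 0 ∧
          PySem.List.pyGetD arr i 0 > PySem.List.pyGetD arr (i+1) 0) := by
        intro hc
        exact hpk (by
          simp only [pvIsPkB, Bool.and_eq_true, decide_eq_true_eq]
          exact ⟨hc.2.2.1, hc.2.2.2⟩)
      rw [if_neg hnB]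
      exact ihb

-- ===== VERDICT (by name: the statement is the Claim_ definition above) =====
theorem find_highest_peak_spec : Claim_equal_find_highest_peak := by
  intro arr _
  show pvPeakLoopA arr
        (pvVPLoopA arr (PySem.List.pyRange 1 ((arr.length : Int) - 1) 1) ([], [])).1
        (arr.length : Int)
        (pvVPLoopA arr (PySem.List.pyRange 1 ((arr.length : Int) - 1) 1) ([], [])).2 (-1) none
      = pvPLoopB arr
        (pvVLoopB arr (PySem.List.pyRange 1 ((arr.length : Int) - 1) 1) (-1, -1)).1
        (pvVLoopB arr (PySem.List.pyRange 1 ((arr.length : Int) - 1) 1) (-1, -1)).2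
        (PySem.List.pyRange 1 ((arr.length : Int) - 1) 1) (-1)
  have hLmem : ∀ i ∈ PySem.List.pyRange 1 ((arr.length : Int) - 1) 1,
      1 ≤ i ∧ i < (arr.length : Int) - 1 := fun i hi => PySem.List.mem_pyRange_one.mp hi
  have hLpos : ∀ i ∈ PySem.List.pyRange 1 ((arr.length : Int) - 1) 1, 0 < i :=
    fun i hi => by have := hLmem i hi; omega
  have hLs : (PySem.List.pyRange 1 ((arr.length : Int) - 1) 1).Pairwise (· < ·) := by
    apply PySem.List.pairwise_lt_pyRange_one
  have hVs : ((PySem.List.pyRange 1 ((arr.length : Int) - 1) 1).filter (pvIsValB arr)).Pairwise (· < ·) :=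
    List.Pairwise.sublist List.filter_sublist hLs
  have hVb : ∀ v ∈ (PySem.List.pyRange 1 ((arr.length : Int) - 1) 1).filter (pvIsValB arr),
      0 < v ∧ v < (arr.length : Int) := fun v hv => by
    have := hLmem v (List.mem_of_mem_filter hv); omega
  have hVpos : ∀ v ∈ (PySem.List.pyRange 1 ((arr.length : Int) - 1) 1).filter (pvIsValB arr),
      0 < v := fun v hv => (hVb v hv).1
  have hvV : ∀ v ∈ (PySem.List.pyRange 1 ((arr.length : Int) - 1) 1).filter (pvIsValB arr),
      pvIsValB arr v = true := fun v hv => List.of_mem_filter hv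
  rw [pvVPLoopA_eq arr _ [] [], pvVLoopB_eq arr _ (-1, -1), pvVFold_start _ hVpos]
  simp only [List.nil_append]
  have h := pvLoops_eq arr ((PySem.List.pyRange 1 ((arr.length : Int) - 1) 1).filter (pvIsValB arr))
    (arr.length : Int)
    (((PySem.List.pyRange 1 ((arr.length : Int) - 1) 1).filter (pvIsValB arr)).headD (-1))
    (((PySem.List.pyRange 1 ((arr.length : Int) - 1) 1).filter (pvIsValB arr)).getLastD (-1))
    (PySem.List.pyRange 1 ((arr.length : Int) - 1) 1) (-1) hLpos
    (fun p hp hpk => pvCond_iff arr _ (arr.length : Int) p hVs hVb hvV (hLpos p hp) hpk)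
  rw [if_pos rfl] at h
  exact h
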